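-- pv_equiv track=rewrite | github.com/JefinFrancis/vw-crash-to-repair-simulator | backend/src/services/part.py | _determine_work_type
-- ===== SOURCE A (Python) =====
-- from typing import List, Optional, Dict, Any
--
-- def _determine_work_type(damaged_parts: List[Dict[str, Any]]) -> str:
--     """Determine work complexity type."""
--     categories = [part.get('category', '') for part in damaged_parts]
--
--     if any(cat in ['engine', 'transmission'] for cat in categories):
--         return 'specialist'
--     elif any(cat in ['body', 'suspension'] for cat in categories):
--         return 'skilled'
--     else:
--         return 'basic'
-- ===== SOURCE B (Python) =====
-- def _determine_work_type(damaged_parts):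
--     """Determine work complexity type via a priority table and a running max."""
--     priority = {'engine': 2, 'transmission': 2, 'body': 1, 'suspension': 1}
--     level = 0
--     for part in damaged_parts:
--         level = max(level, priority.get(part.get('category', ''), 0))
--     return {2: 'specialist', 1: 'skilled'}.get(level, 'basic')
-- ===== Notes on version B (the rewrite author's own statement) =====
-- stated objective: simpler
-- what changed: Replaces the two separate any-membership scans over a materialized categories list with a single pass keeping a running maximum of a category-to-priority table, classifying the final level at the end.
import Mathlib
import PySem

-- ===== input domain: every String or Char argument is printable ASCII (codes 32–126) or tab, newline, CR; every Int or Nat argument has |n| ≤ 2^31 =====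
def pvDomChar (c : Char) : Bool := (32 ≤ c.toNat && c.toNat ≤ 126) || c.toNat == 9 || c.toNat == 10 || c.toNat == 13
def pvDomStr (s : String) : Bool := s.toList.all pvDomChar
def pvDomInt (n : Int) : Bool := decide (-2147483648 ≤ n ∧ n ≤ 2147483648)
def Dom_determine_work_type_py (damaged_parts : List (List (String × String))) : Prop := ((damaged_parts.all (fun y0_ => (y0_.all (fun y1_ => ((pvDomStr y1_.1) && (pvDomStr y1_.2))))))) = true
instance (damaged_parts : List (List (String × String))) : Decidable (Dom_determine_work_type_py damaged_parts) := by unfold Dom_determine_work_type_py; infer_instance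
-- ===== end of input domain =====

-- B replaces A's two any-membership scans with one pass keeping a running max over a
-- category→priority table; objective: simpler.


-- ===== PORT A =====
-- part.get('category', '')
def pvGetCat (part : List (String × String)) : String :=
  (PySem.Dict.mk part).getD "category" ""

def determine_work_type_py (damaged_parts : List (List (String × String))) : String :=
  let categories := damaged_parts.map (fun part => pvGetCat part)
  if categories.any (fun cat => (["engine", "transmission"] : List String).contains cat) then
    "specialist"
  else if categories.any (fun cat => (["body", "suspension"] : List String).contains cat) then
    "skilled"
  else
    "basic"

-- ===== PORT B =====
-- priority.get(cat, 0) with priority = {'engine':2,'transmission':2,'body':1,'suspension':1}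
def pvPriority : PySem.Dict String Int :=
  PySem.Dict.mk [("engine", 2), ("transmission", 2), ("body", 1), ("suspension", 1)]

def determine_work_type_py_alt (damaged_parts : List (List (String × String))) : String :=
  let level := damaged_parts.foldl
    (fun level part => max level (pvPriority.getD (pvGetCat part) 0)) (0 : Int)
  (PySem.Dict.mk [((2 : Int), "specialist"), (1, "skilled")]).getD level "basic"

-- ===== PRECONDITION & SPEC =====
def Spec_determine_work_type_py (damaged_parts : List (List (String × String))) (out : String) : Prop := out = determine_work_type_py_alt damaged_parts
instance (damaged_parts : List (List (String × String))) (out : String) : Decidable (Spec_determine_work_type_py damaged_parts out) := by unfold Spec_determine_work_type_py; infer_instance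

-- ===== CLAIM (what is proved, stated in full; the proofs are below) =====
def Claim_equal_determine_work_type_py : Prop := ∀ (damaged_parts : List (List (String × String))), Dom_determine_work_type_py damaged_parts → Spec_determine_work_type_py damaged_parts (determine_work_type_py damaged_parts)

-- ===== LEMMAS AND PROOFS =====

-- the priority of one category, as B looks it up
def pvPrio (c : String) : Int := pvPriority.getD c 0

lemma pvPrio_eq (c : String) :
    pvPrio c = if c == "engine" then 2 else if c == "transmission" then 2
      else if c == "body" then 1 else if c == "suspension" then 1 else 0 := by
  simp only [pvPrio, pvPriority, PySem.Dict.getD, PySem.Dict.get?]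
  simp [List.lookup]
  split_ifs <;> simp_all [BEq.comm]

lemma pvPrio_nonneg (c : String) : 0 ≤ pvPrio c := by
  rw [pvPrio_eq]; split_ifs <;> norm_num

lemma pvPrio_le_two (c : String) : pvPrio c ≤ 2 := by
  rw [pvPrio_eq]; split_ifs <;> norm_num

lemma pvPrio_eq_two_iff (c : String) :
    2 ≤ pvPrio c ↔ ((["engine", "transmission"] : List String).contains c = true) := by
  rw [pvPrio_eq]
  simp only [List.contains_cons, List.contains_nil, Bool.or_false, Bool.or_eq_true]
  constructor
  · intro h
    split_ifs at h with h1 h2 h3 h4 <;> simp_all [BEq.comm]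
  · rintro (h | h) <;> simp_all [BEq.comm]

lemma pvPrio_pos_iff (c : String) :
    1 ≤ pvPrio c ↔ ((["engine", "transmission", "body", "suspension"] : List String).contains c = true) := by
  rw [pvPrio_eq]
  simp only [List.contains_cons, List.contains_nil, Bool.or_false, Bool.or_eq_true]
  constructor
  · intro h
    split_ifs at h with h1 h2 h3 h4 <;> simp_all [BEq.comm]
  · rintro (h | h | h | h) <;> simp_all [BEq.comm]

-- the level B's loop computes
def pvLvl (xs : List (List (String × String))) : Int :=
  xs.foldl (fun level part => max level (pvPrio (pvGetCat part))) 0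

lemma foldl_max_acc (xs : List (List (String × String))) :
    ∀ acc : Int, 0 ≤ acc →
      xs.foldl (fun level part => max level (pvPrio (pvGetCat part))) acc = max acc (pvLvl xs) := by
  induction xs with
  | nil => intro acc h; simp [pvLvl]; omega
  | cons p xs ih =>
    intro acc h
    have hp := pvPrio_nonneg (pvGetCat p)
    simp only [pvLvl, List.foldl_cons]
    rw [ih (max acc (pvPrio (pvGetCat p))) (by omega),
        ih (max 0 (pvPrio (pvGetCat p))) (by omega)]
    omega

lemma pvLvl_cons (p : List (String × String)) (xs : List (List (String × String))) :
    pvLvl (p :: xs) = max (pvPrio (pvGetCat p)) (pvLvl xs) := by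
  have hp := pvPrio_nonneg (pvGetCat p)
  simp only [pvLvl, List.foldl_cons]
  rw [foldl_max_acc xs _ (by omega), foldl_max_acc xs _ (by omega)]
  omega

lemma pvLvl_nonneg (xs : List (List (String × String))) : 0 ≤ pvLvl xs := by
  induction xs with
  | nil => simp [pvLvl]
  | cons p xs ih => rw [pvLvl_cons]; have := pvPrio_nonneg (pvGetCat p); omega

lemma pvLvl_le_two (xs : List (List (String × String))) : pvLvl xs ≤ 2 := by
  induction xs with
  | nil => simp [pvLvl]
  | cons p xs ih => rw [pvLvl_cons]; have := pvPrio_le_two (pvGetCat p); omega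

lemma pvLvl_two_iff (xs : List (List (String × String))) :
    2 ≤ pvLvl xs ↔
      xs.any (fun p => (["engine", "transmission"] : List String).contains (pvGetCat p)) = true := by
  induction xs with
  | nil => simp [pvLvl]
  | cons p xs ih =>
    rw [pvLvl_cons]
    simp only [List.any_cons, Bool.or_eq_true, ← ih, ← pvPrio_eq_two_iff]
    omega

lemma pvLvl_one_iff (xs : List (List (String × String))) :
    1 ≤ pvLvl xs ↔
      xs.any (fun p => (["engine", "transmission", "body", "suspension"] : List String).contains (pvGetCat p)) = true := by
  induction xs with
  | nil => simp [pvLvl]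
  | cons p xs ih =>
    rw [pvLvl_cons]
    simp only [List.any_cons, Bool.or_eq_true, ← ih, ← pvPrio_pos_iff]
    omega

lemma contains_four_split (c : String) :
    ((["engine", "transmission", "body", "suspension"] : List String).contains c) =
      (((["engine", "transmission"] : List String).contains c) ||
       ((["body", "suspension"] : List String).contains c)) := by
  simp [Bool.or_assoc]

lemma alt_eq_classify (xs : List (List (String × String))) :
    determine_work_type_py_alt xs =
      (PySem.Dict.mk [((2 : Int), "specialist"), (1, "skilled")]).getD (pvLvl xs) "basic" := by
  simp only [determine_work_type_py_alt, pvLvl, pvPrio]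

-- ===== VERDICT (by name: the statement is the Claim_ definition above) =====
theorem determine_work_type_py_spec : Claim_equal_determine_work_type_py := by
  intro xs _
  unfold Spec_determine_work_type_py
  rw [alt_eq_classify]
  have h0 := pvLvl_nonneg xs
  have h2 := pvLvl_le_two xs
  simp only [determine_work_type_py, List.any_map, Function.comp_def]
  by_cases hs : xs.any (fun p => (["engine", "transmission"] : List String).contains (pvGetCat p)) = true
  · have hl : pvLvl xs = 2 := by have := (pvLvl_two_iff xs).2 hs; omega
    rw [if_pos hs, hl]; decide
  · by_cases hk : xs.any (fun p => (["body", "suspension"] : List String).contains (pvGetCat p)) = true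
    · have h1 : 1 ≤ pvLvl xs := by
        rw [pvLvl_one_iff]
        rw [List.any_eq_true] at hk ⊢
        obtain ⟨p, hp, hc⟩ := hk
        exact ⟨p, hp, by rw [contains_four_split, hc, Bool.or_true]⟩
      have hne2 : ¬ 2 ≤ pvLvl xs := by rw [pvLvl_two_iff]; exact hs
      have hl : pvLvl xs = 1 := by omega
      rw [if_neg hs, if_pos hk, hl]; decide
    · have hl : pvLvl xs = 0 := by
        have : ¬ 1 ≤ pvLvl xs := by
          rw [pvLvl_one_iff]
          rw [List.any_eq_true]
          rintro ⟨p, hp, hc⟩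
          rw [contains_four_split] at hc
          rcases Bool.or_eq_true_iff.1 hc with h | h
          · exact hs (List.any_eq_true.2 ⟨p, hp, h⟩)
          · exact hk (List.any_eq_true.2 ⟨p, hp, h⟩)
        omega
      rw [if_neg hs, if_neg hk, hl]; decide
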